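-- pv_equiv track=rewrite | github.com/dimgiagos44/Prog-Lang-NTUA | set2/qssort.py | isFinal1
-- ===== SOURCE A (Python) =====
-- def isFinal1(queue, stack):
--     if(queue==0 and stack==0):
--         return False
--     for i in range(0, len(queue)-1):
--         if queue[i][0] > queue[i+1][0]:
--             return False
--     if not stack:
--         return True
--     else:
--         return False
-- ===== SOURCE B (Python) =====
-- def isFinal1(queue, stack):
--     if list(queue) != sorted(queue, key=lambda x: x[0]):
--         return False
--     return not stack
-- ===== Notes on version B (the rewrite author's own statement) =====
-- stated objective: simpler
-- what changed: Replaces the index-based adjacent-pair scan with a stable sort-then-compare (queue equals sorted(queue, key=first)) and returns 'not stack' instead of the if/else tail; the dead 'queue==0 and stack==0' guard is dropped.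
import Mathlib
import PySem

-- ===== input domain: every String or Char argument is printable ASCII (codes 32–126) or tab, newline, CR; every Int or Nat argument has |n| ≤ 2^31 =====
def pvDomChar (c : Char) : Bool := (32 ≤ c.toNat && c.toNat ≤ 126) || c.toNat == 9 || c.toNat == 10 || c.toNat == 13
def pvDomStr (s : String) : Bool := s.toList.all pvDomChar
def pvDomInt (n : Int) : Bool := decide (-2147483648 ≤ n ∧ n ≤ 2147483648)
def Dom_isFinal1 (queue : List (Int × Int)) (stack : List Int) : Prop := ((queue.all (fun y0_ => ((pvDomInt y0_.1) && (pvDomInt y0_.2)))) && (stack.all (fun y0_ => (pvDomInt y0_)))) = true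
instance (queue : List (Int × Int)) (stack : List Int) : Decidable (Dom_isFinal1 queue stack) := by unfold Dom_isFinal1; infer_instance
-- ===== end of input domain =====

-- B replaces the adjacent-pair index scan with a stable sort-then-compare; objective: simpler.

-- ===== PORT A =====
-- the 'for i in range(0, len(queue)-1)' loop with its early 'return False';
-- on loop exit it falls through to 'return True if not stack else False'.
-- (A's 'if queue==0 and stack==0' guard compares a list with 0, which is always False in Python,
--  so it is omitted as dead code.)
def isFinal1Go (queue : List (Int × Int)) (stack : List Int) : List Int → Bool
  | [] => if stack.isEmpty then true else false
  | i :: rest =>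
      if (PySem.List.pyGetD queue i (0, 0)).1 > (PySem.List.pyGetD queue (i + 1) (0, 0)).1 then
        false
      else isFinal1Go queue stack rest

def isFinal1 (queue : List (Int × Int)) (stack : List Int) : Bool :=
  isFinal1Go queue stack (PySem.List.pyRange 0 ((queue.length : Int) - 1) 1)

-- ===== PORT B =====
def isFinal1_alt (queue : List (Int × Int)) (stack : List Int) : Bool :=
  if queue ≠ PySem.List.sorted queue (fun x => x.1) false then false
  else stack.isEmpty

-- ===== PRECONDITION & SPEC =====
def Spec_isFinal1 (queue : List (Int × Int)) (stack : List Int) (out : Bool) : Prop := out = isFinal1_alt queue stack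
instance (queue : List (Int × Int)) (stack : List Int) (out : Bool) : Decidable (Spec_isFinal1 queue stack out) := by unfold Spec_isFinal1; infer_instance

-- ===== CLAIM (what is proved, stated in full; the proofs are below) =====
def Claim_equal_isFinal1 : Prop := ∀ (queue : List (Int × Int)) (stack : List Int), Dom_isFinal1 queue stack → Spec_isFinal1 queue stack (isFinal1 queue stack)

-- ===== LEMMAS AND PROOFS =====

-- the loop returns the stack check iff no scanned adjacent pair is out of order
theorem isFinal1Go_eq (queue : List (Int × Int)) (stack : List Int) (idxs : List Int) :
    isFinal1Go queue stack idxs =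
      if ∀ i ∈ idxs, ¬ (PySem.List.pyGetD queue i (0, 0)).1 > (PySem.List.pyGetD queue (i + 1) (0, 0)).1
      then (if stack.isEmpty then true else false) else false := by
  induction idxs with
  | nil => simp [isFinal1Go]
  | cons i rest ih =>
      simp only [isFinal1Go, ih, List.mem_cons]
      by_cases h : (PySem.List.pyGetD queue i (0, 0)).1 > (PySem.List.pyGetD queue (i + 1) (0, 0)).1
      · simp [h]
      · have h' := not_lt.mp h
        simp [h']

-- A's scan succeeds iff queue is adjacent-nondecreasing by first component
theorem scan_iff_chain (queue : List (Int × Int)) :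
    (∀ i ∈ PySem.List.pyRange 0 ((queue.length : Int) - 1) 1,
        ¬ (PySem.List.pyGetD queue i (0, 0)).1 > (PySem.List.pyGetD queue (i + 1) (0, 0)).1)
      ↔ List.IsChain (fun a b : Int × Int => a.1 ≤ b.1) queue := by
  rw [List.isChain_iff_getElem]
  constructor
  · intro h k hk
    have hk' : (k : Int) < (queue.length : Int) - 1 := by omega
    have := h (k : Int) (by rw [PySem.List.mem_pyRange_one]; exact ⟨by positivity, hk'⟩)
    rw [PySem.List.pyGetD_eq_getElem _ _ (by omega) (by omega),
        PySem.List.pyGetD_eq_getElem _ _ (by omega) (by push_cast; omega)] at this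
    have h2 : ((k : Int) + 1).toNat = k + 1 := by omega
    simp only [Int.toNat_natCast, h2] at this
    exact not_lt.mp this
  · intro h i hi
    rw [PySem.List.mem_pyRange_one] at hi
    obtain ⟨h0, h1⟩ := hi
    rw [PySem.List.pyGetD_eq_getElem _ _ h0 (by omega),
        PySem.List.pyGetD_eq_getElem _ _ (by omega) (by omega)]
    have h2 : (i + 1).toNat = i.toNat + 1 := by omega
    simp only [h2]
    exact not_lt.mpr (h i.toNat (by omega))

-- B's equality test succeeds iff queue is adjacent-nondecreasing by first component
theorem sorted_eq_iff_chain (queue : List (Int × Int)) :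
    queue = PySem.List.sorted queue (fun x => x.1) false
      ↔ List.IsChain (fun a b : Int × Int => a.1 ≤ b.1) queue := by
  haveI : Trans (fun a b : Int × Int => a.1 ≤ b.1) (fun a b : Int × Int => a.1 ≤ b.1) (fun a b : Int × Int => a.1 ≤ b.1) :=
    ⟨fun h1 h2 => le_trans h1 h2⟩
  rw [List.isChain_iff_pairwise]
  constructor
  · intro h
    rw [h]
    exact PySem.List.sorted_pairwise queue (fun x => x.1)
  · intro h
    exact (PySem.List.sorted_eq_self_of_pairwise queue (fun x => x.1) h).symm

-- ===== VERDICT (by name: the statement is the Claim_ definition above) =====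
theorem isFinal1_spec : Claim_equal_isFinal1 := by
  intro queue stack _
  unfold Spec_isFinal1 isFinal1 isFinal1_alt
  rw [isFinal1Go_eq]
  by_cases h : List.IsChain (fun a b : Int × Int => a.1 ≤ b.1) queue
  · rw [if_pos ((scan_iff_chain queue).mpr h),
        if_neg (not_not_intro ((sorted_eq_iff_chain queue).mpr h))]
    cases stack <;> simp
  · rw [if_neg (fun hc => h ((scan_iff_chain queue).mp hc)),
        if_pos (fun hc => h ((sorted_eq_iff_chain queue).mp hc))]
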